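-- pv_equiv track=rewrite | github.com/PraneetKapoor2619/Sandbox | hcl_training/week3/capitalize.py | solve
-- ===== SOURCE A (Python) =====
-- def solve(s):
--         new_str = ""
--         inside_word = False
--         for char in s :
--                 if (char.isalnum()) :
--                         if (inside_word == False) :
--                                 inside_word = True
--                                 new_str += char.upper()
--                         else :
--                                 new_str += char
--                 else :
--                         inside_word = False
--                         new_str += char
--         return new_str
-- ===== SOURCE B (Python) =====
-- from itertools import groupby
--
-- def solve(s):
--     pieces = []
--     for is_alnum, group in groupby(s, key=str.isalnum):
--         g = ''.join(group)
--         pieces.append(g[0].upper() + g[1:] if is_alnum else g)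
--     return ''.join(pieces)
-- ===== Notes on version B (the rewrite author's own statement) =====
-- stated objective: idiomatic
-- what changed: Replaces the per-character inside_word state machine (with repeated string += concatenation) by itertools.groupby(s, key=str.isalnum): alphanumeric runs get their first character upper-cased, other runs pass through, and the pieces are joined once.
import Mathlib
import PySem

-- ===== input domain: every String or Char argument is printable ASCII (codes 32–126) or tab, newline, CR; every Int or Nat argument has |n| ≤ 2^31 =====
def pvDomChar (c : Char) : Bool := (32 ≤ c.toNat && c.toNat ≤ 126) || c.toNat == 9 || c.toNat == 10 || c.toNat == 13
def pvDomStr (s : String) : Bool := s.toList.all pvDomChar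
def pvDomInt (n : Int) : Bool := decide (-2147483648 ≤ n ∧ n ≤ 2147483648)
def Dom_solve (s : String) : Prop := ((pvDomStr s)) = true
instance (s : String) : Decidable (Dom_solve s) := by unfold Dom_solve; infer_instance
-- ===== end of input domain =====

-- B replaces A's per-character inside_word state machine with a run-grouping
-- decomposition (groupby on isalnum); objective: idiomatic, same cost.


-- ===== PORT A =====
-- for-loop over the characters with (new_str, inside_word) state; the loop body:
def solveStep (st : List Char × Bool) (c : Char) : List Char × Bool :=
  if PySem.Chars.isalnum c then
    if st.2 == false then (st.1 ++ [PySem.Chars.upperChar c], true)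
    else (st.1 ++ [c], st.2)
  else (st.1 ++ [c], false)

def solve (s : String) : String :=
  String.ofList (s.toList.foldl solveStep ([], false)).1

-- ===== PORT B =====
-- groupby(s, key=str.isalnum): split off one maximal run of equal isalnum-key
-- per step; upper-case the first char of alphanumeric runs; join the pieces.
def solveAltGo : List Char → List Char
  | [] => []
  | c :: rest =>
    let k := PySem.Chars.isalnum c
    let run := rest.takeWhile (fun x => PySem.Chars.isalnum x == k)
    let rest' := rest.dropWhile (fun x => PySem.Chars.isalnum x == k)
    (if k then PySem.Chars.upperChar c :: run else c :: run) ++ solveAltGo rest'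
termination_by l => l.length
decreasing_by
  simpa using Nat.lt_succ_of_le (List.length_dropWhile_le _ _)

def solve_alt (s : String) : String := String.ofList (solveAltGo s.toList)

-- ===== PRECONDITION & SPEC =====
def Spec_solve (s : String) (out : String) : Prop := out = solve_alt s
instance (s : String) (out : String) : Decidable (Spec_solve s out) := by unfold Spec_solve; infer_instance

-- ===== CLAIM (what is proved, stated in full; the proofs are below) =====
def Claim_equal_solve : Prop := ∀ (s : String), Dom_solve s → Spec_solve s (solve s)

-- ===== LEMMAS AND PROOFS =====

-- A's state machine as a plain recursion on the character list
def aRec : Bool → List Char → List Char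
  | _, [] => []
  | inside, c :: rest =>
    if PySem.Chars.isalnum c then
      if inside then c :: aRec true rest
      else PySem.Chars.upperChar c :: aRec true rest
    else c :: aRec false rest

lemma foldA (l : List Char) : ∀ (acc : List Char) (inside : Bool),
    (l.foldl solveStep (acc, inside)).1 = acc ++ aRec inside l := by
  induction l with
  | nil => intro acc inside; simp [aRec]
  | cons c rest ih =>
    intro acc inside
    rw [List.foldl_cons]
    by_cases hk : PySem.Chars.isalnum c = true
    · cases inside
      · rw [show solveStep (acc, false) c = (acc ++ [PySem.Chars.upperChar c], true) by
          simp [solveStep, hk]]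
        rw [ih]; simp [aRec, hk]
      · rw [show solveStep (acc, true) c = (acc ++ [c], true) by simp [solveStep, hk]]
        rw [ih]; simp [aRec, hk]
    · simp at hk
      rw [show solveStep (acc, inside) c = (acc ++ [c], false) by simp [solveStep, hk]]
      rw [ih]; simp [aRec, hk]

lemma aRec_true_run (l : List Char) :
    aRec true l = l.takeWhile (fun x => PySem.Chars.isalnum x == true)
      ++ aRec false (l.dropWhile (fun x => PySem.Chars.isalnum x == true)) := by
  induction l with
  | nil => simp [aRec]
  | cons c rest ih =>
    by_cases hk : PySem.Chars.isalnum c = true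
    · simp [aRec, hk, ih]
    · simp at hk
      simp [aRec, hk]

lemma aRec_false_run (l : List Char) :
    aRec false l = l.takeWhile (fun x => PySem.Chars.isalnum x == false)
      ++ aRec false (l.dropWhile (fun x => PySem.Chars.isalnum x == false)) := by
  induction l with
  | nil => simp [aRec]
  | cons c rest ih =>
    by_cases hk : PySem.Chars.isalnum c = true
    · simp [aRec, hk]
    · simp at hk
      simp [aRec, hk, ih]

lemma goB : ∀ (n : Nat) (l : List Char), l.length ≤ n → solveAltGo l = aRec false l := by
  intro n
  induction n with
  | zero =>
    intro l hl
    have : l = [] := List.eq_nil_of_length_eq_zero (Nat.le_zero.mp hl)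
    subst this; simp [solveAltGo, aRec]
  | succ n ih =>
    intro l hl
    cases l with
    | nil => simp [solveAltGo, aRec]
    | cons c rest =>
      have hrest : rest.length ≤ n := Nat.lt_succ_iff.mp (by simpa using hl)
      have hdrop : (rest.dropWhile (fun x => PySem.Chars.isalnum x == PySem.Chars.isalnum c)).length ≤ n :=
        le_trans (List.length_dropWhile_le _ _) hrest
      rw [solveAltGo]
      by_cases hk : PySem.Chars.isalnum c = true
      · simp only [hk] at hdrop ⊢
        rw [ih _ hdrop]
        simp [aRec, hk, aRec_true_run rest]
      · simp at hk
        simp only [hk] at hdrop ⊢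
        rw [ih _ hdrop]
        simp [aRec, hk, aRec_false_run rest]

-- ===== VERDICT (by name: the statement is the Claim_ definition above) =====
theorem solve_spec : Claim_equal_solve := by
  intro s _
  unfold Spec_solve solve solve_alt
  rw [goB s.toList.length s.toList le_rfl, foldA]
  simp
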